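-- pv_equiv track=rewrite | github.com/cc166/Profiles | upstream/scripts/sync_upstream_rules.py | payload_rule_lines
-- ===== SOURCE A (Python) =====
-- def payload_rule_lines(text: str) -> int:
--     in_payload = False
--     count = 0
--     for raw in text.splitlines():
--         line = raw.strip()
--         if not line or line.startswith('#'):
--             continue
--         if line == 'payload:':
--             in_payload = True
--             continue
--         if in_payload and line.startswith('- '):
--             count += 1
--     return count
-- ===== SOURCE B (Python) =====
-- def payload_rule_lines(text: str) -> int:
--     lines = [r.strip() for r in text.splitlines()]
--     try:
--         i = lines.index('payload:')
--     except ValueError: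
--         return 0
--     return sum(1 for line in lines[i + 1:] if line.startswith('- '))
-- ===== Notes on version B (the rewrite author's own statement) =====
-- stated objective: simpler
-- what changed: Replaces the running in_payload flag and branch chain with a find-then-count decomposition: strip all lines once, locate the first 'payload:' line, then count '- '-prefixed lines in the tail slice.
import Mathlib
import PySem

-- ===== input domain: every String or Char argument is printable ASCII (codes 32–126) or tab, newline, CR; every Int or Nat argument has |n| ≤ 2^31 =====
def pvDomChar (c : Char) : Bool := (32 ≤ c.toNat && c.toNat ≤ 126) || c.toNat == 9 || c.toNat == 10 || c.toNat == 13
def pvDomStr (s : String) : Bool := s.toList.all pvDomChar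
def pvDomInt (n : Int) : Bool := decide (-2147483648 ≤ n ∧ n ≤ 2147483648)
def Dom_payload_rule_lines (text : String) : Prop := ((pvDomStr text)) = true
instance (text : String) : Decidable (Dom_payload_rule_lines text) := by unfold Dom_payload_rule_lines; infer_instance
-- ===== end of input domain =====

-- B replaces A's running in_payload flag with a find-the-marker-then-count-the-tail decomposition (simpler; same cost).

-- ===== PORT A =====
-- one step of A's for-loop; state = (in_payload, count)
def pvStepA (st : Bool × Int) (raw : String) : Bool × Int :=
  let line := PySem.Str.strip raw
  if line = "" ∨ PySem.Str.startswith line "#" = true then st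
  else if line = "payload:" then (true, st.2)
  else if st.1 = true ∧ PySem.Str.startswith line "- " = true then (st.1, st.2 + 1)
  else st

def payload_rule_lines (text : String) : Int :=
  ((PySem.Str.splitlines text).foldl pvStepA (false, 0)).2

-- ===== PORT B =====
def payload_rule_lines_alt (text : String) : Int :=
  let lines := (PySem.Str.splitlines text).map PySem.Str.strip
  match PySem.List.index? lines "payload:" with
  | none => 0
  | some i => ((lines.drop (i + 1)).countP (fun l => PySem.Str.startswith l "- ") : Int)

-- ===== PRECONDITION & SPEC =====
def Spec_payload_rule_lines (text : String) (out : Int) : Prop := out = payload_rule_lines_alt text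
instance (text : String) (out : Int) : Decidable (Spec_payload_rule_lines text out) := by unfold Spec_payload_rule_lines; infer_instance

-- ===== CLAIM (what is proved, stated in full; the proofs are below) =====
def Claim_equal_payload_rule_lines : Prop := ∀ (text : String), Dom_payload_rule_lines text → Spec_payload_rule_lines text (payload_rule_lines text)

-- ===== LEMMAS AND PROOFS =====

-- A's loop step applied to an already-stripped line
def pvStepS (st : Bool × Int) (line : String) : Bool × Int :=
  if line = "" ∨ PySem.Str.startswith line "#" = true then st
  else if line = "payload:" then (true, st.2)
  else if st.1 = true ∧ PySem.Str.startswith line "- " = true then (st.1, st.2 + 1)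
  else st

-- a line starting with '#' does not start with '- '
theorem hash_not_dash (cs : List Char) (h : PySem.Chars.startswith cs ['#'] = true) :
    PySem.Chars.startswith cs ['-', ' '] = false := by
  rw [PySem.Chars.startswith_iff] at h
  by_contra hb
  rw [Bool.not_eq_false, PySem.Chars.startswith_iff] at hb
  obtain ⟨t1, h1⟩ := h
  obtain ⟨t2, h2⟩ := hb
  have : '#' :: t1 = '-' :: ' ' :: t2 := h1.trans h2.symm
  simp at this

-- with the flag true, a step adds 1 exactly on '- ' lines
theorem stepS_true (c : Int) (l : String) :
    pvStepS (true, c) l = (true, if PySem.Str.startswith l "- " = true then c + 1 else c) := by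
  unfold pvStepS
  by_cases hskip : l = "" ∨ PySem.Str.startswith l "#" = true
  · rw [if_pos hskip]
    rcases hskip with h | h
    · subst h; simp; decide
    · have hd := hash_not_dash l.toList (by simpa using h)
      simp [hd]
  · rw [if_neg hskip]
    by_cases hp : l = "payload:"
    · subst hp; simp; decide
    · rw [if_neg hp]
      simp only [true_and]
      split_ifs with h <;> simp_all

theorem foldS_true (ls : List String) (c : Int) :
    (ls.foldl pvStepS (true, c)).2
      = c + (ls.countP (fun l => PySem.Str.startswith l "- ") : Int) := by
  induction ls generalizing c with
  | nil => simp
  | cons l ls ih =>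
    simp only [List.foldl_cons, stepS_true, List.countP_cons]
    by_cases hd : PySem.Str.startswith l "- " = true
    · simp only [ih, hd, if_true]
      push_cast
      ring
    · simp only [if_neg hd, ih]
      simp_all

-- with the flag false, the loop counts nothing until the first 'payload:' line, then counts the tail
theorem foldS_false (ls : List String) (c : Int) :
    (ls.foldl pvStepS (false, c)).2
      = c + (match PySem.List.index? ls "payload:" with
             | none => 0
             | some i => ((ls.drop (i + 1)).countP (fun l => PySem.Str.startswith l "- ") : Int)) := by
  induction ls generalizing c with
  | nil => simp [PySem.List.index?]
  | cons l ls ih =>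
    by_cases hp : l = "payload:"
    · subst hp
      rw [PySem.List.index?_cons_self]
      simp only [List.foldl_cons]
      have hstep : pvStepS (false, c) "payload:" = (true, c) := by
        unfold pvStepS
        norm_num
        refine ⟨by decide, by decide⟩
      rw [hstep]
      simpa using foldS_true ls c
    · have hi : PySem.List.index? (l :: ls) "payload:"
          = (PySem.List.index? ls "payload:").map (· + 1) :=
        PySem.List.index?_cons_of_ne ls hp
    -- with the flag false and l not the marker, the state is unchanged
      have hstep : pvStepS (false, c) l = (false, c) := by
        unfold pvStepS
        by_cases h1 : l = "" ∨ PySem.Str.startswith l "#" = true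
        · rw [if_pos h1]
        · rw [if_neg h1, if_neg hp, if_neg (by simp)]
      simp only [List.foldl_cons, hstep, ih, hi]
      cases PySem.List.index? ls "payload:" with
      | none => rfl
      | some i => simp

-- ===== VERDICT (by name: the statement is the Claim_ definition above) =====
theorem payload_rule_lines_spec : Claim_equal_payload_rule_lines := by
  intro text _
  show payload_rule_lines text = payload_rule_lines_alt text
  unfold payload_rule_lines payload_rule_lines_alt
  rw [show pvStepA = fun st raw => pvStepS st (PySem.Str.strip raw) from rfl,
    ← List.foldl_map, foldS_false]
  simp only [PySem.List.index?_eq_idxOf?]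
  cases List.idxOf? "payload:" ((PySem.Str.splitlines text).map PySem.Str.strip) with
  | none => simp
  | some i => simp
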